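-- pv_equiv track=rewrite | github.com/BoevaLab/sae-for-scFMs | sae4scfm/core/analysis.py | gene_families
-- ===== SOURCE A (Python) =====
-- def gene_families(all_genes):
--     """
--     Pre-calculate gene family lists for efficient reuse in gene_scoring.
--
--     Args:
--         all_genes: List of all gene names in the dataset
--
--     Returns:
--         Dict mapping family names to lists of genes in that family
--     """
--     families = {}
--     families['RP'] = [gene for gene in all_genes if (gene.startswith('RPL') or gene.startswith('RPS') or gene in ['UBA52', 'FAU'])]
--     families['MIT'] = [gene for gene in all_genes if gene.startswith('MT-')]
--     families['MHC'] = [gene for gene in all_genes if gene.startswith('HLA-')]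
--     families['TRAV'] = [gene for gene in all_genes if gene.startswith('TR')]
--     families['H'] = [gene for gene in all_genes if (gene.startswith('H1') or gene.startswith('H2') or gene.startswith('H3')
--                 or gene.startswith('H4'))]
--     families['MET'] = [gene for gene in all_genes if (gene.startswith('MT1') or gene.startswith('MT2') or gene.startswith('MT3') or gene.startswith('MT4'))]
--     families['IG'] = [gene for gene in all_genes if gene.startswith('IG')]
--
--     return families
-- ===== SOURCE B (Python) =====
-- def gene_families(all_genes):
--     fams = {'RP': [], 'MIT': [], 'MHC': [], 'TRAV': [], 'H': [], 'MET': [], 'IG': []}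
--     for g in all_genes:
--         if g.startswith('RPL') or g.startswith('RPS') or g in ('UBA52', 'FAU'):
--             fams['RP'].append(g)
--         if g.startswith('MT-'):
--             fams['MIT'].append(g)
--         if g.startswith('HLA-'):
--             fams['MHC'].append(g)
--         if g.startswith('TR'):
--             fams['TRAV'].append(g)
--         if g.startswith('H1') or g.startswith('H2') or g.startswith('H3') or g.startswith('H4'):
--             fams['H'].append(g)
--         if g.startswith('MT1') or g.startswith('MT2') or g.startswith('MT3') or g.startswith('MT4'):
--             fams['MET'].append(g)
--         if g.startswith('IG'):
--             fams['IG'].append(g)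
--     return fams
-- ===== Notes on version B (the rewrite author's own statement) =====
-- stated objective: alternative
-- what changed: B pre-initializes all seven family keys and makes a single pass over all_genes, appending each gene to every family whose test it passes, instead of A's seven separate full scans (one comprehension per family).
import Mathlib
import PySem

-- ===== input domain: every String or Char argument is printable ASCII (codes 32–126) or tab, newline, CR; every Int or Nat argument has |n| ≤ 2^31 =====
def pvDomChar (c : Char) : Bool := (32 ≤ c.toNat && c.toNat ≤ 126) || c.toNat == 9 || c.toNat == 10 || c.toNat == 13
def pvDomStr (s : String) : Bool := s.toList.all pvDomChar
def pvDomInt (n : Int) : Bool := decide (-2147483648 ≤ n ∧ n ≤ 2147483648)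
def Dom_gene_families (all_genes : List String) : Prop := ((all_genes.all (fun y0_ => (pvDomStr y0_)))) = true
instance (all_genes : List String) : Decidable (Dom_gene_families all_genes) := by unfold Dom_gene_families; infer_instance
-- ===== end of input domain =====

-- B replaces A's seven separate comprehension scans by a single pass that appends each
-- gene to every family list whose test it passes (objective: alternative decomposition).

-- ===== PORT A =====
-- A: one full filter pass per family, families dict built key by key in insertion order.
def gene_families (all_genes : List String) : List (String × List String) :=
  [("RP", all_genes.filter (fun g => PySem.Str.startswith g "RPL" || PySem.Str.startswith g "RPS" || g == "UBA52" || g == "FAU")),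
   ("MIT", all_genes.filter (fun g => PySem.Str.startswith g "MT-")),
   ("MHC", all_genes.filter (fun g => PySem.Str.startswith g "HLA-")),
   ("TRAV", all_genes.filter (fun g => PySem.Str.startswith g "TR")),
   ("H", all_genes.filter (fun g => PySem.Str.startswith g "H1" || PySem.Str.startswith g "H2" || PySem.Str.startswith g "H3" || PySem.Str.startswith g "H4")),
   ("MET", all_genes.filter (fun g => PySem.Str.startswith g "MT1" || PySem.Str.startswith g "MT2" || PySem.Str.startswith g "MT3" || PySem.Str.startswith g "MT4")),
   ("IG", all_genes.filter (fun g => PySem.Str.startswith g "IG"))]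

-- ===== PORT B =====
-- B: single foldl over all_genes carrying the seven family lists as one state,
-- appending the current gene to each list whose test succeeds (Source B's loop).
def gene_families_alt (all_genes : List String) : List (String × List String) :=
  let fams := all_genes.foldl
    (fun s g =>
      ((if PySem.Str.startswith g "RPL" || PySem.Str.startswith g "RPS" || g == "UBA52" || g == "FAU" then s.1 ++ [g] else s.1),
       (if PySem.Str.startswith g "MT-" then s.2.1 ++ [g] else s.2.1),
       (if PySem.Str.startswith g "HLA-" then s.2.2.1 ++ [g] else s.2.2.1),
       (if PySem.Str.startswith g "TR" then s.2.2.2.1 ++ [g] else s.2.2.2.1),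
       (if PySem.Str.startswith g "H1" || PySem.Str.startswith g "H2" || PySem.Str.startswith g "H3" || PySem.Str.startswith g "H4" then s.2.2.2.2.1 ++ [g] else s.2.2.2.2.1),
       (if PySem.Str.startswith g "MT1" || PySem.Str.startswith g "MT2" || PySem.Str.startswith g "MT3" || PySem.Str.startswith g "MT4" then s.2.2.2.2.2.1 ++ [g] else s.2.2.2.2.2.1),
       (if PySem.Str.startswith g "IG" then s.2.2.2.2.2.2 ++ [g] else s.2.2.2.2.2.2)))
    (([] : List String), ([] : List String), ([] : List String), ([] : List String), ([] : List String), ([] : List String), ([] : List String))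
  [("RP", fams.1), ("MIT", fams.2.1), ("MHC", fams.2.2.1), ("TRAV", fams.2.2.2.1),
   ("H", fams.2.2.2.2.1), ("MET", fams.2.2.2.2.2.1), ("IG", fams.2.2.2.2.2.2)]

-- ===== PRECONDITION & SPEC =====
def Spec_gene_families (all_genes : List String) (out : List (String × List String)) : Prop := out = gene_families_alt all_genes
instance (all_genes : List String) (out : List (String × List String)) : Decidable (Spec_gene_families all_genes out) := by unfold Spec_gene_families; infer_instance

-- ===== CLAIM (what is proved, stated in full; the proofs are below) =====
def Claim_equal_gene_families : Prop := ∀ (all_genes : List String), Dom_gene_families all_genes → Spec_gene_families all_genes (gene_families all_genes)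

-- ===== LEMMAS AND PROOFS =====
-- The single-pass fold carries seven independent accumulators; splitting it
-- componentwise shows each accumulator is the corresponding filter.
theorem gf_split7 (p1 p2 p3 p4 p5 p6 p7 : String → Bool) (l : List String)
    (a1 a2 a3 a4 a5 a6 a7 : List String) :
    l.foldl (fun s g =>
      ((if p1 g then s.1 ++ [g] else s.1),
       (if p2 g then s.2.1 ++ [g] else s.2.1),
       (if p3 g then s.2.2.1 ++ [g] else s.2.2.1),
       (if p4 g then s.2.2.2.1 ++ [g] else s.2.2.2.1),
       (if p5 g then s.2.2.2.2.1 ++ [g] else s.2.2.2.2.1),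
       (if p6 g then s.2.2.2.2.2.1 ++ [g] else s.2.2.2.2.2.1),
       (if p7 g then s.2.2.2.2.2.2 ++ [g] else s.2.2.2.2.2.2)))
      (a1, a2, a3, a4, a5, a6, a7)
    = (a1 ++ l.filter p1, a2 ++ l.filter p2, a3 ++ l.filter p3, a4 ++ l.filter p4,
       a5 ++ l.filter p5, a6 ++ l.filter p6, a7 ++ l.filter p7) := by
  induction l generalizing a1 a2 a3 a4 a5 a6 a7 with
  | nil => simp
  | cons g t ih =>
    simp only [List.foldl_cons, List.filter_cons]
    rw [ih]
    simp only [Prod.mk.injEq]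
    refine ⟨?_, ?_, ?_, ?_, ?_, ?_, ?_⟩ <;> split <;> simp

theorem gene_families_loop_eq (all_genes : List String) :
    gene_families_alt all_genes = gene_families all_genes := by
  unfold gene_families_alt gene_families
  simp only [gf_split7]
  simp

-- ===== VERDICT (by name: the statement is the Claim_ definition above) =====
theorem gene_families_spec : Claim_equal_gene_families := by
  intro all_genes _
  unfold Spec_gene_families
  exact (gene_families_loop_eq all_genes).symm
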